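-- pv_equiv track=rewrite | github.com/v-henters/port-scanner | portsense/analysis/osint.py | compare_ports
-- ===== SOURCE A (Python) =====
-- from typing import List, Dict
--
-- def compare_ports(local_ports: List[int], shodan_ports: List[int]) -> Dict[int, str]:
--     """
--     로컬 스캔 결과와 Shodan 결과를 비교해서
--     포트별 신뢰도(high / medium)를 반환
--     """
--
--     result = {}
--
--     all_ports = set(local_ports + shodan_ports)
--
--     for port in all_ports:
--         if port in local_ports and port in shodan_ports:
--             result[port] = "high"
--         else:
--             result[port] = "medium"
--
--     return result
-- ===== SOURCE B (Python) =====
-- from typing import List, Dict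
-- from collections import Counter
--
-- def compare_ports(local_ports: List[int], shodan_ports: List[int]) -> Dict[int, str]:
--     # Dedupe each source, then count how many sources report each port:
--     # multiplicity 2 means both sources -> "high", multiplicity 1 -> "medium".
--     counts = Counter(list(dict.fromkeys(local_ports)) + list(dict.fromkeys(shodan_ports)))
--     return {port: ("high" if c == 2 else "medium") for port, c in counts.items()}
-- ===== Notes on version B (the rewrite author's own statement) =====
-- stated objective: alternative
-- what changed: B never tests membership: it deduplicates each source list, builds a Counter over their concatenation, and labels each port by its multiplicity (2 sources -> high, 1 -> medium), replacing A's per-element double list-membership branch over the union.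
import Mathlib
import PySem

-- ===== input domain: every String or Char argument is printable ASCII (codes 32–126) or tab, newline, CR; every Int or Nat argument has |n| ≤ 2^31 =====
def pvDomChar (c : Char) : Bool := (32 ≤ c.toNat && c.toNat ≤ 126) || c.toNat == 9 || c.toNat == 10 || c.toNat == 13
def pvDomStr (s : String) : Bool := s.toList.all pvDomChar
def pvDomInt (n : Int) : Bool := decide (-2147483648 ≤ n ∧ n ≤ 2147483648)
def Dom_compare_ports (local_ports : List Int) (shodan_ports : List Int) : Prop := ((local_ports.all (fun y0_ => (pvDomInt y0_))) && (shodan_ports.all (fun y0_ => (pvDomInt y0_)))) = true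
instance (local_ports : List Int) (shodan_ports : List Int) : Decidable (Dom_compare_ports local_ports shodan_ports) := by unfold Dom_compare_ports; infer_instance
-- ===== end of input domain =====

-- B counts how many (deduplicated) source lists report each port and labels by multiplicity
-- (2 -> "high", 1 -> "medium"), instead of A's per-element double list-membership branch (objective: alternative).

-- ===== PORT A =====
def compare_ports (local_ports : List Int) (shodan_ports : List Int) : List (Int × String) :=
  let result : PySem.Dict Int String := PySem.Dict.empty
  let all_ports : PySem.Set Int := PySem.Set.ofList (local_ports ++ shodan_ports)
  let result := all_ports.foldl (fun r port =>
    if local_ports.contains port && shodan_ports.contains port then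
      r.insert port "high"
    else
      r.insert port "medium") result
  result.items

-- ===== PORT B =====
def compare_ports_alt (local_ports : List Int) (shodan_ports : List Int) : List (Int × String) :=
  let counts : PySem.Dict Int Int :=
    PySem.Dict.counter (PySem.List.dedup local_ports ++ PySem.List.dedup shodan_ports)
  -- the dict comprehension over counts.items
  (counts.items.foldl (fun d pc =>
      d.insert pc.1 (if pc.2 == 2 then "high" else "medium")) PySem.Dict.empty).items

-- ===== PRECONDITION & SPEC =====
def Spec_compare_ports (local_ports : List Int) (shodan_ports : List Int) (out : List (Int × String)) : Prop := out = compare_ports_alt local_ports shodan_ports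
instance (local_ports : List Int) (shodan_ports : List Int) (out : List (Int × String)) : Decidable (Spec_compare_ports local_ports shodan_ports out) := by unfold Spec_compare_ports; infer_instance

-- ===== CLAIM =====
def Claim_equal_compare_ports : Prop := ∀ (local_ports : List Int) (shodan_ports : List Int), Dom_compare_ports local_ports shodan_ports → Spec_compare_ports local_ports shodan_ports (compare_ports local_ports shodan_ports)

-- ===== LEMMAS AND PROOFS =====

-- A's loop: distinct fresh keys inserted into the empty dict append in order.
theorem itemsA (lp sp : List Int) :
    compare_ports lp sp
      = (PySem.Set.ofList (lp ++ sp)).map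
          (fun p => (p, if lp.contains p && sp.contains p then "high" else "medium")) := by
  show ((PySem.Set.ofList (lp ++ sp)).foldl (fun r port =>
      if lp.contains port && sp.contains port then r.insert port "high"
      else r.insert port "medium") PySem.Dict.empty).items = _
  have hfun : (fun (r : PySem.Dict Int String) port =>
      if lp.contains port && sp.contains port then r.insert port "high"
      else r.insert port "medium")
      = fun r port => r.insert port
          (if lp.contains port && sp.contains port then "high" else "medium") := by
    funext r port; split <;> rfl
  rw [hfun, PySem.Dict.items_foldl_insert_fresh (PySem.Set.ofList (lp ++ sp)) (fun a => a)
      (fun port => if lp.contains port && sp.contains port then "high" else "medium")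
      PySem.Dict.empty (fun _ _ => PySem.Dict.contains_empty _)
      (by simp [PySem.Set.nodup_ofList])]
  rfl

-- deduping each side first does not change the union's first-occurrence order
theorem ofList_dedup_append (lp sp : List Int) :
    PySem.Set.ofList (PySem.List.dedup lp ++ PySem.List.dedup sp)
      = PySem.Set.ofList (lp ++ sp) := by
  simp only [PySem.List.dedup_eq_ofList, PySem.Set.ofList_append, PySem.Set.ofList_ofList,
    PySem.Set.update_eq_append_filter]

-- the multiplicity of a port in the concatenation of the two deduped lists
theorem count_dedup (p : Int) (l : List Int) :
    (PySem.List.dedup l).count p = if p ∈ l then 1 else 0 := by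
  rw [PySem.List.dedup_eq_ofList]
  by_cases h : p ∈ l
  · rw [if_pos h]
    exact List.count_eq_one_of_mem (PySem.Set.nodup_ofList l) ((PySem.Set.mem_ofList _ _).2 h)
  · rw [if_neg h]
    exact List.count_eq_zero_of_not_mem (fun hc => h ((PySem.Set.mem_ofList _ _).1 hc))

theorem nodup_fst_map_pair {A B : Type} (g : A -> B) (S : List A) (h : S.Nodup) :
    ((S.map (fun a => (a, g a))).map (fun pc => pc.1)).Nodup := by
  have hc : ((fun (pc : A × B) => pc.1) ∘ fun a => (a, g a)) = fun a => a := rfl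
  rw [List.map_map, hc]
  simpa using h

-- B unfolds to the same map over the same key order
theorem itemsB (lp sp : List Int) :
    compare_ports_alt lp sp
      = (PySem.Set.ofList (lp ++ sp)).map
          (fun p => (p, if ((PySem.List.dedup lp ++ PySem.List.dedup sp).count p : Int) == 2
                        then "high" else "medium")) := by
  show ((PySem.Dict.counter (PySem.List.dedup lp ++ PySem.List.dedup sp)).items.foldl
      (fun d pc => d.insert pc.1 (if pc.2 == 2 then "high" else "medium"))
      PySem.Dict.empty).items = _
  rw [PySem.Dict.items_counter, ofList_dedup_append]
  rw [PySem.Dict.items_foldl_insert_fresh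
      ((PySem.Set.ofList (lp ++ sp)).map (fun k => (k, ((PySem.List.dedup lp ++ PySem.List.dedup sp).count k : Int))))
      (fun pc => pc.1) (fun pc => if pc.2 == 2 then "high" else "medium")
      PySem.Dict.empty (fun _ _ => PySem.Dict.contains_empty _)
      (by exact nodup_fst_map_pair _ _ (PySem.Set.nodup_ofList (lp ++ sp)))]
  simp only [List.map_map]
  rfl

-- ===== VERDICT =====
theorem compare_ports_spec : Claim_equal_compare_ports := by
  intro lp sp _
  unfold Spec_compare_ports
  rw [itemsA, itemsB]
  apply List.map_congr_left
  intro p hp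
  have hmem : p ∈ lp ∨ p ∈ sp := by
    have := (PySem.Set.mem_ofList _ _).1 hp
    simpa using this
  congr 1
  rw [List.count_append, count_dedup, count_dedup]
  rcases Decidable.em (p ∈ lp) with h1 | h1 <;> rcases Decidable.em (p ∈ sp) with h2 | h2
  · simp [h1, h2]
  · simp [h1, h2]
  · simp [h1, h2]
  · exact absurd hmem (by simp [h1, h2])
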